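-- pv_equiv track=rewrite | github.com/tomerfiliba-org/reedsolomon | reedsolo.py | rs_forney_syndromes
-- ===== SOURCE A (Python) =====
-- gf_exp = [1] * 512
--
-- gf_log = [0] * 256
--
-- def gf_mul(x, y):
--     if x == 0 or y == 0:
--         return 0
--     return gf_exp[gf_log[x] + gf_log[y]]
--
-- def rs_forney_syndromes(synd, pos, nmess):
--     fsynd = list(synd)      # make a copy
--     for i in range(0, len(pos)):
--         x = gf_exp[nmess - 1 - pos[i]]
--         for i in range(0, len(fsynd) - 1):
--             fsynd[i] = gf_mul(fsynd[i], x) ^ fsynd[i + 1]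
--         fsynd.pop()
--     return fsynd
-- ===== SOURCE B (Python) =====
-- gf_exp = [1] * 512
--
-- gf_log = [0] * 256
--
-- def gf_mul(x, y):
--     if x == 0 or y == 0:
--         return 0
--     return gf_exp[gf_log[x] + gf_log[y]]
--
-- def rs_forney_syndromes(synd, pos, nmess):
--     # One right-to-left sweep: maintain the anti-diagonal column of the
--     # reduction table (col[t] = value after t erasure rounds at the current
--     # index) and emit each final coefficient as soon as its column is full,
--     # instead of len(pos) full in-place reduction passes each ending in a pop.
--     xs = [gf_exp[nmess - 1 - p] for p in pos]
--     k = len(xs)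
--     out = []
--     col = []
--     for s in reversed(synd):
--         new = [s]
--         for x, c in zip(xs, col):
--             new.append(gf_mul(new[-1], x) ^ c)
--         col = new
--         if len(col) == k + 1:
--             out.append(col[k])
--     out.reverse()
--     return out
-- ===== Notes on version B (the rewrite author's own statement) =====
-- stated objective: alternative
-- what changed: Replaces A's len(pos) in-place reduction passes (each mutating the whole list and popping its last element) by a single right-to-left sweep that maintains the anti-diagonal column of the reduction table and emits each output coefficient once its column is complete.
import Mathlib
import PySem

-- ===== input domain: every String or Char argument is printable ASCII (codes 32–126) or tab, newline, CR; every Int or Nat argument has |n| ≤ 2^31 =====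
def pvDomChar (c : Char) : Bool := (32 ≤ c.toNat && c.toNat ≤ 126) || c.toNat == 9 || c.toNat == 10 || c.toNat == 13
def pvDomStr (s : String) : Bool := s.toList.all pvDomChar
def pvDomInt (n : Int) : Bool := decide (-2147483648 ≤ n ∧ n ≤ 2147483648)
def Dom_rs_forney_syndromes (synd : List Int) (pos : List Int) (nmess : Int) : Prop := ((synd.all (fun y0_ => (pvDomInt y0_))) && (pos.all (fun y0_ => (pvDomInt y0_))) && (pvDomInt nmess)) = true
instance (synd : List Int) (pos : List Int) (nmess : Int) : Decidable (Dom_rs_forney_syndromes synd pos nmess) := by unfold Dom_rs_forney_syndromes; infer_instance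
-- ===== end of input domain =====

-- B replaces A's len(pos) in-place reduction passes (each ending in a pop) by one
-- right-to-left sweep maintaining the anti-diagonal column of the reduction table
-- (alternative decomposition; same asymptotic cost).

-- ===== PORT A =====
def gf_exp : List Int := List.replicate 512 1

def gf_log : List Int := List.replicate 256 0

def gf_mul (x y : Int) : Int :=
  if x = 0 ∨ y = 0 then 0
  else PySem.List.pyGetD gf_exp (PySem.List.pyGetD gf_log x 0 + PySem.List.pyGetD gf_log y 0) 0

def rs_forney_syndromes (synd : List Int) (pos : List Int) (nmess : Int) : List Int :=
  (PySem.List.pyRange 0 (pos.length : Int) 1).foldl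
    (fun fsynd i =>
      let x := PySem.List.pyGetD gf_exp (nmess - 1 - PySem.List.pyGetD pos i 0) 0
      let fsynd' := (PySem.List.pyRange 0 ((fsynd.length : Int) - 1) 1).foldl
        (fun g j =>
          PySem.List.pySetD g j
            (PySem.Int.bxor (gf_mul (PySem.List.pyGetD g j 0) x) (PySem.List.pyGetD g (j + 1) 0)))
        fsynd
      fsynd'.dropLast)  -- fsynd.pop(); the popped value is discarded (raise on [] is outside Pre_)
    synd

-- ===== PORT B =====
def rs_forney_syndromes_alt (synd : List Int) (pos : List Int) (nmess : Int) : List Int :=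
  let xs := pos.map (fun p => PySem.List.pyGetD gf_exp (nmess - 1 - p) 0)
  let k := xs.length
  -- state = (out, col); 'new' carries (the list, its last element) for new[-1]
  let st := synd.reverse.foldl
    (fun (st : List Int × List Int) s =>
      let nw := (xs.zip st.2).foldl
        (fun (nw : List Int × Int) xc =>
          let v := PySem.Int.bxor (gf_mul nw.2 xc.1) xc.2
          (nw.1 ++ [v], v))
        ([s], s)
      let col := nw.1
      if col.length = k + 1 then (st.1 ++ [PySem.List.pyGetD col (k : Int) 0], col)
      else (st.1, col))
    ([], [])
  st.1.reverse

-- ===== PRECONDITION & SPEC =====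
-- Pre_ is exactly the no-raise set of A: enough syndromes to pop one per erasure,
-- every gf_exp index in range, and (when a reduction round actually runs a gf_mul)
-- every syndrome value except the last inside gf_log's index range.
def Pre_rs_forney_syndromes (synd : List Int) (pos : List Int) (nmess : Int) : Prop :=
  pos.length ≤ synd.length ∧
  (∀ p ∈ pos, -512 ≤ nmess - 1 - p ∧ nmess - 1 - p < 512) ∧
  (pos = [] ∨ ∀ v ∈ synd.dropLast, -256 ≤ v ∧ v < 256)

instance (synd : List Int) (pos : List Int) (nmess : Int) : Decidable (Pre_rs_forney_syndromes synd pos nmess) := by unfold Pre_rs_forney_syndromes; infer_instance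

def pvWitness_rs_forney_syndromes : List Int × List Int × Int := ([1, 2, 3], [0, 1], 3)

def Spec_rs_forney_syndromes (synd : List Int) (pos : List Int) (nmess : Int) (out : List Int) : Prop := out = rs_forney_syndromes_alt synd pos nmess
instance (synd : List Int) (pos : List Int) (nmess : Int) (out : List Int) : Decidable (Spec_rs_forney_syndromes synd pos nmess out) := by unfold Spec_rs_forney_syndromes; infer_instance

-- ===== CLAIM (what is proved, stated in full; the proofs are below) =====
def Claim_equal_rs_forney_syndromes : Prop := ∀ (synd : List Int) (pos : List Int) (nmess : Int), Dom_rs_forney_syndromes synd pos nmess → Pre_rs_forney_syndromes synd pos nmess → Spec_rs_forney_syndromes synd pos nmess (rs_forney_syndromes synd pos nmess)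

-- ===== LEMMAS AND PROOFS =====

-- ---------- A side: the in-place reduction pass + pop is a pairwise zipWith ----------

theorem pvGetD_cons_succ (c : Int) (rest : List Int) (i : Int) (hi : 0 ≤ i) (d : Int) :
    PySem.List.pyGetD (c :: rest) (i + 1) d = PySem.List.pyGetD rest i d := by
  obtain ⟨n, rfl⟩ := Int.eq_ofNat_of_zero_le hi
  rw [show ((n : Int) + 1) = ((n + 1 : Nat) : Int) by push_cast; ring]
  rw [PySem.List.pyGetD_natCast, PySem.List.pyGetD_natCast]
  simp

theorem pvSetD_cons_succ (c v : Int) (rest : List Int) (i : Int) (hi : 0 ≤ i) :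
    PySem.List.pySetD (c :: rest) (i + 1) v = c :: PySem.List.pySetD rest i v := by
  obtain ⟨n, rfl⟩ := Int.eq_ofNat_of_zero_le hi
  rw [show ((n : Int) + 1) = ((n + 1 : Nat) : Int) by push_cast; ring]
  rw [PySem.List.pySetD_natCast, PySem.List.pySetD_natCast]
  rfl

-- One in-place reduction step at a positive index leaves the head alone.
theorem pvStep_cons (f : Int → Int → Int) (c : Int) (rest : List Int) (i : Int) (hi : 0 ≤ i) :
    PySem.List.pySetD (c :: rest) (i + 1)
      (f (PySem.List.pyGetD (c :: rest) (i + 1) 0) (PySem.List.pyGetD (c :: rest) (i + 1 + 1) 0))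
      = c :: PySem.List.pySetD rest i
          (f (PySem.List.pyGetD rest i 0) (PySem.List.pyGetD rest (i + 1) 0)) := by
  rw [pvGetD_cons_succ c rest i hi, pvGetD_cons_succ c rest (i + 1) (by omega),
      pvSetD_cons_succ c _ rest i hi]

-- The inner index loop shifted one to the right on c :: rest = c :: the loop on rest.
theorem pvLoop_shift (f : Int → Int → Int) :
    ∀ (n : Nat) (lo : Int), 0 ≤ lo →
    ∀ (c : Int) (rest : List Int),
    (PySem.List.pyRange (lo + 1) (lo + n + 1) 1).foldl
        (fun g j => PySem.List.pySetD g j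
          (f (PySem.List.pyGetD g j 0) (PySem.List.pyGetD g (j + 1) 0))) (c :: rest)
      = c :: (PySem.List.pyRange lo (lo + n) 1).foldl
        (fun g j => PySem.List.pySetD g j
          (f (PySem.List.pyGetD g j 0) (PySem.List.pyGetD g (j + 1) 0))) rest := by
  intro n
  induction n with
  | zero =>
    intro lo hlo c rest
    rw [PySem.List.pyRange_one_eq_nil (by omega), PySem.List.pyRange_one_eq_nil (by omega)]
    rfl
  | succ m ih =>
    intro lo hlo c rest
    rw [PySem.List.pyRange_one_cons (show lo + 1 < lo + ((m + 1 : Nat) : Int) + 1 by push_cast; omega)]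
    rw [PySem.List.pyRange_one_cons (show lo < lo + ((m + 1 : Nat) : Int) by push_cast; omega)]
    simp only [List.foldl]
    rw [pvStep_cons f c rest lo hlo]
    rw [show lo + ((m + 1 : Nat) : Int) + 1 = (lo + 1) + (m : Int) + 1 by push_cast; ring,
        show lo + ((m + 1 : Nat) : Int) = (lo + 1) + (m : Int) by push_cast; ring]
    exact ih (lo + 1) (by omega) c _

-- The reduction loop never changes the length from nonzero to zero.
theorem pvFoldl_ne_nil (f : Int → Int → Int) (r : List Int) :
    ∀ (s : List Int), s ≠ [] →
    (r.foldl (fun g j => PySem.List.pySetD g j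
      (f (PySem.List.pyGetD g j 0) (PySem.List.pyGetD g (j + 1) 0))) s) ≠ [] := by
  induction r with
  | nil => intro s hs; simpa using hs
  | cons j r ihr =>
    intro s hs
    simp only [List.foldl]
    apply ihr
    intro hcon
    apply hs
    have := congrArg List.length hcon
    simpa [PySem.List.length_pySetD] using this

-- A's in-place reduction pass followed by the pop IS a pairwise zip.
theorem pvInner_eq_zip (f : Int → Int → Int) :
    ∀ (l : List Int),
    ((PySem.List.pyRange 0 ((l.length : Int) - 1) 1).foldl
        (fun g j => PySem.List.pySetD g j
          (f (PySem.List.pyGetD g j 0) (PySem.List.pyGetD g (j + 1) 0))) l).dropLast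
      = List.zipWith f l l.tail := by
  intro l
  induction l with
  | nil => rw [PySem.List.pyRange_one_eq_nil (by simp)]; rfl
  | cons a l ih =>
    cases l with
    | nil => rw [PySem.List.pyRange_one_eq_nil (by simp)]; rfl
    | cons b t =>
      have hb : ((a :: b :: t).length : Int) - 1 = (t.length : Int) + 1 := by
        push_cast [List.length_cons]; ring
      have hb2 : ((b :: t).length : Int) - 1 = (t.length : Int) := by
        push_cast [List.length_cons]; ring
      rw [hb]
      rw [PySem.List.pyRange_one_cons (show (0 : Int) < (t.length : Int) + 1 by omega)]
      simp only [List.foldl]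
      have h0 : PySem.List.pySetD (a :: b :: t) 0
          (f (PySem.List.pyGetD (a :: b :: t) 0 0) (PySem.List.pyGetD (a :: b :: t) (0 + 1) 0))
          = f a b :: b :: t := by
        simp [pysem]
      rw [h0]
      have hshift := pvLoop_shift f t.length 0 (by omega) (f a b) (b :: t)
      rw [show (0 : Int) + (t.length : Int) + 1 = (t.length : Int) + 1 by ring,
          show (0 : Int) + (t.length : Int) = ((t.length : Int)) by ring] at hshift
      rw [hshift]
      rw [List.dropLast_cons_of_ne_nil (pvFoldl_ne_nil f _ (b :: t) (by simp))]
      rw [hb2] at ih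
      rw [ih]
      rfl

-- ---------- common vocabulary: one reduction round and k rounds ----------

def pvF (x a b : Int) : Int := PySem.Int.bxor (gf_mul a x) b

def pvZr (x : Int) (l : List Int) : List Int := List.zipWith (fun a b => pvF x a b) l l.tail

def pvRounds (xs : List Int) (l : List Int) : List Int := xs.foldl (fun l x => pvZr x l) l

theorem pvZr_length (x : Int) (l : List Int) : (pvZr x l).length = l.length - 1 := by
  cases l <;> simp [pvZr]

theorem pvRounds_length (xs : List Int) : ∀ l : List Int,
    (pvRounds xs l).length = l.length - xs.length := by
  induction xs with
  | nil => intro l; simp [pvRounds]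
  | cons x xs ih =>
    intro l
    have : pvRounds (x :: xs) l = pvRounds xs (pvZr x l) := rfl
    rw [this, ih, pvZr_length]
    simp only [List.length_cons]
    omega

theorem pvZr_cons_cons (x s b : Int) (t : List Int) :
    pvZr x (s :: b :: t) = pvF x s b :: pvZr x (b :: t) := rfl

theorem pvRounds_tail (xs : List Int) : ∀ (s : Int) (rest : List Int),
    xs.length ≤ rest.length →
    (pvRounds xs (s :: rest)).tail = pvRounds xs rest := by
  induction xs with
  | nil => intro s rest _; rfl
  | cons x xs ih =>
    intro s rest h
    cases rest with
    | nil => simp at h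
    | cons b t =>
      have e1 : pvRounds (x :: xs) (s :: b :: t)
          = pvRounds xs (pvF x s b :: pvZr x (b :: t)) := by
        show pvRounds xs (pvZr x (s :: b :: t)) = _
        rw [pvZr_cons_cons]
      have h' : xs.length ≤ (pvZr x (b :: t)).length := by
        rw [pvZr_length]; simp only [List.length_cons] at h ⊢; omega
      rw [e1, ih _ _ h']
      rfl

theorem pvRounds_cons (xs : List Int) (s : Int) (rest : List Int)
    (h : xs.length ≤ rest.length) :
    pvRounds xs (s :: rest)
      = (pvRounds xs (s :: rest)).headD 0 :: pvRounds xs rest := by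
  have hlen : (pvRounds xs (s :: rest)).length = rest.length + 1 - xs.length := by
    rw [pvRounds_length]; simp
  cases hE : pvRounds xs (s :: rest) with
  | nil => rw [hE] at hlen; simp at hlen; omega
  | cons a tt =>
    have htl := pvRounds_tail xs s rest h
    rw [hE] at htl
    simp only [List.tail_cons] at htl
    simp [htl]

theorem pvRounds_snoc (xs : List Int) (x : Int) (l : List Int) :
    pvRounds (xs ++ [x]) l = pvZr x (pvRounds xs l) := by
  simp [pvRounds]

theorem pvZr_headD (x : Int) (l : List Int) (h : 2 ≤ l.length) :
    (pvZr x l).headD 0 = pvF x (l.headD 0) (l.tail.headD 0) := by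
  match l, h with
  | a :: b :: t, _ => simp [pvZr]

-- ---------- B side: the sweep ----------

-- the inner append-fold of the sweep is a scanl
def pvSc (a : Int) (xc : Int × Int) : Int := PySem.Int.bxor (gf_mul a xc.1) xc.2

theorem pvScanl_ne_nil (f : Int → Int × Int → Int) (b : Int) (l : List (Int × Int)) :
    List.scanl f b l ≠ [] := by
  cases l <;> simp [List.scanl_cons]

theorem pvGetLastD_irrel (l : List Int) (h : l ≠ []) (d d' : Int) :
    l.getLastD d = l.getLastD d' := by
  cases l with
  | nil => exact absurd rfl h
  | cons a t => rfl

theorem pvInnerFold_spec (ps : List (Int × Int)) : ∀ (pre : List Int) (s : Int),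
    ps.foldl (fun (nw : List Int × Int) xc =>
        let v := PySem.Int.bxor (gf_mul nw.2 xc.1) xc.2
        (nw.1 ++ [v], v)) (pre ++ [s], s)
      = (pre ++ List.scanl pvSc s ps, (List.scanl pvSc s ps).getLastD 0) := by
  induction ps with
  | nil => intro pre s; simp [List.scanl]
  | cons xc ps ih =>
    intro pre s
    simp only [List.foldl_cons]
    have hstep : (let v := PySem.Int.bxor (gf_mul (pre ++ [s], s).2 xc.1) xc.2
        ((pre ++ [s], s).1 ++ [v], v)) = ((pre ++ [s]) ++ [pvSc s xc], pvSc s xc) := rfl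
    rw [hstep, ih (pre ++ [s]) (pvSc s xc)]
    rw [List.scanl_cons]
    refine Prod.ext (by simp) ?_
    show (List.scanl pvSc (pvSc s xc) ps).getLastD 0
        = (s :: List.scanl pvSc (pvSc s xc) ps).getLastD 0
    rw [List.getLastD_cons]
    exact pvGetLastD_irrel _ (pvScanl_ne_nil _ _ _) _ _

-- the column after the sweep over l
def pvCol (xs : List Int) : List Int → List Int
  | [] => []
  | s :: rest => List.scanl pvSc s (xs.zip (pvCol xs rest))

theorem pvCol_length (xs : List Int) : ∀ l : List Int,
    (pvCol xs l).length = min (xs.length + 1) l.length := by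
  intro l
  induction l with
  | nil => simp [pvCol]
  | cons s rest ih =>
    simp only [pvCol, List.length_scanl, List.length_zip, ih, List.length_cons]
    omega

theorem pvScanl_getD_succ (f : Int → α → Int) (da : α) :
    ∀ (l : List α) (b : Int) (i : Nat), i < l.length →
    (List.scanl f b l).getD (i + 1) 0 = f ((List.scanl f b l).getD i 0) (l.getD i da) := by
  intro l
  induction l with
  | nil => intro b i h; simp at h
  | cons a l ih =>
    intro b i h
    cases i with
    | zero => simp [List.scanl_cons]
    | succ i =>
      simp only [List.scanl_cons, List.getD_cons_succ]
      exact ih (f b a) i (by simpa using h)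

theorem pvZip_getD (as bs : List Int) (t : Nat) (h : t < (as.zip bs).length) :
    (as.zip bs).getD t (0, 0) = (as.getD t 0, bs.getD t 0) := by
  have h1 : t < as.length := by simp [List.length_zip] at h; omega
  have h2 : t < bs.length := by simp [List.length_zip] at h; omega
  rw [List.getD_eq_getElem _ _ h, List.getD_eq_getElem _ _ h1,
      List.getD_eq_getElem _ _ h2, List.getElem_zip]

-- the column invariant: entry t is the head of t reduction rounds on the suffix
theorem pvCol_spec (xs : List Int) : ∀ (l : List Int) (t : Nat),
    t < min (xs.length + 1) l.length →
    (pvCol xs l).getD t 0 = (pvRounds (xs.take t) l).headD 0 := by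
  intro l
  induction l with
  | nil => intro t ht; simp at ht
  | cons s rest ih =>
    intro t
    induction t with
    | zero =>
      intro _
      simp [pvCol, pvRounds]  -- entry 0 is the raw syndrome
    | succ t iht =>
      intro ht
      have hk : t < xs.length := by simp at ht; omega
      have hr : t < rest.length := by simp at ht; omega
      have hpairs : t < (xs.zip (pvCol xs rest)).length := by
        rw [List.length_zip, pvCol_length]
        omega
      have hstep := pvScanl_getD_succ pvSc ((0 : Int), (0 : Int))
        (xs.zip (pvCol xs rest)) s t hpairs
      have hzip := pvZip_getD xs (pvCol xs rest) t hpairs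
      have hcolrest : (pvCol xs rest).getD t 0 = (pvRounds (xs.take t) rest).headD 0 :=
        ih t (by omega)
      have hprev : (List.scanl pvSc s (xs.zip (pvCol xs rest))).getD t 0
          = (pvRounds (xs.take t) (s :: rest)).headD 0 := iht (by simp; omega)
      -- rewrite the (t+1)-th column entry
      show (List.scanl pvSc s (xs.zip (pvCol xs rest))).getD (t + 1) 0 = _
      rw [hstep, hzip, hprev]
      have htake : xs.take (t + 1) = xs.take t ++ [xs.getD t 0] := by
        rw [List.take_add_one, List.getElem?_eq_getElem hk, List.getD_eq_getElem _ _ hk]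
        rfl
      rw [htake, pvRounds_snoc]
      have hlent : (xs.take t).length = t := by simp; omega
      have hlen2 : 2 ≤ (pvRounds (xs.take t) (s :: rest)).length := by
        rw [pvRounds_length, hlent]
        simp only [List.length_cons]
        omega
      rw [pvZr_headD _ _ hlen2]
      have htail : (pvRounds (xs.take t) (s :: rest)).tail = pvRounds (xs.take t) rest := by
        exact pvRounds_tail _ s rest (by omega)
      rw [htail, ← hcolrest]
      rfl

-- the sweep invariant
theorem pvSweep_spec (xs : List Int) : ∀ l : List Int,
    l.reverse.foldl
      (fun (st : List Int × List Int) s =>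
        let nw := (xs.zip st.2).foldl
          (fun (nw : List Int × Int) xc =>
            let v := PySem.Int.bxor (gf_mul nw.2 xc.1) xc.2
            (nw.1 ++ [v], v))
          ([s], s)
        let col := nw.1
        if col.length = xs.length + 1 then
          (st.1 ++ [PySem.List.pyGetD col (xs.length : Int) 0], col)
        else (st.1, col))
      ([], [])
    = ((pvRounds xs l).reverse, pvCol xs l) := by
  intro l
  induction l with
  | nil =>
    have h0 : pvRounds xs [] = [] := by
      have := pvRounds_length xs []
      simpa using this
    simp [pvCol, h0]
  | cons s l ih =>
    rw [List.reverse_cons, List.foldl_append, ih]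
    simp only [List.foldl_cons, List.foldl_nil]
    have hinner := pvInnerFold_spec (xs.zip (pvCol xs l)) [] s
    simp only [List.nil_append] at hinner
    rw [hinner]
    have hcol : List.scanl pvSc s (xs.zip (pvCol xs l)) = pvCol xs (s :: l) := rfl
    have hclen : (pvCol xs (s :: l)).length = min (xs.length + 1) (l.length + 1) := by
      rw [pvCol_length]; rfl
    by_cases hk : xs.length ≤ l.length
    · -- the column is full: one output coefficient is emitted
      have hcond : (pvCol xs (s :: l)).length = xs.length + 1 := by rw [hclen]; omega
      rw [hcol]
      have hval : PySem.List.pyGetD (pvCol xs (s :: l)) ((xs.length : Nat) : Int) 0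
          = (pvRounds xs (s :: l)).headD 0 := by
        rw [PySem.List.pyGetD_natCast]
        rw [pvCol_spec xs (s :: l) xs.length (by simp; omega)]
        rw [List.take_length]
      rw [if_pos hcond, hval]
      conv_rhs => rw [pvRounds_cons xs s l hk]
      rw [List.reverse_cons]
    · -- not enough syndromes yet: no output, both rounds results are empty
      have hcond : ¬ (pvCol xs (s :: l)).length = xs.length + 1 := by rw [hclen]; omega
      rw [hcol, if_neg hcond]
      have h1 : pvRounds xs (s :: l) = [] := by
        have := pvRounds_length xs (s :: l)
        simp only [List.length_cons] at this
        exact List.length_eq_zero_iff.mp (by omega)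
      have h2 : pvRounds xs l = [] := by
        have := pvRounds_length xs l
        exact List.length_eq_zero_iff.mp (by omega)
      rw [h1, h2]

-- ---------- assembling both sides ----------

theorem rs_forney_A_eq_rounds (synd : List Int) (pos : List Int) (nmess : Int) :
    rs_forney_syndromes synd pos nmess
      = pvRounds (pos.map (fun p => PySem.List.pyGetD gf_exp (nmess - 1 - p) 0)) synd := by
  unfold rs_forney_syndromes
  change (PySem.List.pyRange 0 (pos.length : Int) 1).foldl
      (fun fsynd i =>
        ((PySem.List.pyRange 0 ((fsynd.length : Int) - 1) 1).foldl
          (fun g j => PySem.List.pySetD g j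
            (PySem.Int.bxor
              (gf_mul (PySem.List.pyGetD g j 0)
                (PySem.List.pyGetD gf_exp (nmess - 1 - PySem.List.pyGetD pos i 0) 0))
              (PySem.List.pyGetD g (j + 1) 0))) fsynd).dropLast)
      synd
    = _
  rw [PySem.List.foldl_pyRange_zero_pyGetD' pos (0 : Int)
      (fun fsynd p =>
        ((PySem.List.pyRange 0 ((fsynd.length : Int) - 1) 1).foldl
          (fun g j => PySem.List.pySetD g j
            (PySem.Int.bxor
              (gf_mul (PySem.List.pyGetD g j 0)
                (PySem.List.pyGetD gf_exp (nmess - 1 - p) 0))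
              (PySem.List.pyGetD g (j + 1) 0))) fsynd).dropLast) synd]
  have hfun : (fun (fsynd : List Int) (p : Int) =>
        ((PySem.List.pyRange 0 ((fsynd.length : Int) - 1) 1).foldl
          (fun g j => PySem.List.pySetD g j
            (PySem.Int.bxor
              (gf_mul (PySem.List.pyGetD g j 0)
                (PySem.List.pyGetD gf_exp (nmess - 1 - p) 0))
              (PySem.List.pyGetD g (j + 1) 0))) fsynd).dropLast)
      = (fun (fsynd : List Int) (p : Int) =>
          pvZr (PySem.List.pyGetD gf_exp (nmess - 1 - p) 0) fsynd) := by
    funext fs p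
    exact pvInner_eq_zip
      (fun a b => PySem.Int.bxor (gf_mul a (PySem.List.pyGetD gf_exp (nmess - 1 - p) 0)) b) fs
  rw [hfun]
  unfold pvRounds
  rw [List.foldl_map]

theorem rs_forney_B_eq_rounds (synd : List Int) (pos : List Int) (nmess : Int) :
    rs_forney_syndromes_alt synd pos nmess
      = pvRounds (pos.map (fun p => PySem.List.pyGetD gf_exp (nmess - 1 - p) 0)) synd := by
  unfold rs_forney_syndromes_alt
  show ((synd.reverse.foldl
      (fun (st : List Int × List Int) s =>
        let nw := (((pos.map (fun p => PySem.List.pyGetD gf_exp (nmess - 1 - p) 0))).zip st.2).foldl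
          (fun (nw : List Int × Int) xc =>
            let v := PySem.Int.bxor (gf_mul nw.2 xc.1) xc.2
            (nw.1 ++ [v], v))
          ([s], s)
        let col := nw.1
        if col.length = (pos.map (fun p => PySem.List.pyGetD gf_exp (nmess - 1 - p) 0)).length + 1 then
          (st.1 ++ [PySem.List.pyGetD col (((pos.map (fun p => PySem.List.pyGetD gf_exp (nmess - 1 - p) 0)).length : Nat) : Int) 0], col)
        else (st.1, col))
      ([], [])).1).reverse = _
  rw [pvSweep_spec (pos.map (fun p => PySem.List.pyGetD gf_exp (nmess - 1 - p) 0)) synd]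
  rw [List.reverse_reverse]

-- ===== VERDICT (by name: the statement is the Claim_ definition above) =====
theorem rs_forney_syndromes_spec : Claim_equal_rs_forney_syndromes := by
  intro synd pos nmess _ _
  unfold Spec_rs_forney_syndromes
  rw [rs_forney_A_eq_rounds, rs_forney_B_eq_rounds]
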